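-- pv_equiv track=rewrite | github.com/vaibhav-chauthe/ssw-567-project | mrz/base/functions.py | transliterate
-- ===== SOURCE A (Python) =====
-- def transliterate(string: str, dictionary: dict, sep="<") -> str:
--
--     word = string.replace(u"\u002D", u"\u0020").split(u"\u0020")
--     for i in range(len(word)):
--         final_word = ""
--         for char in word[i]:
--             final_word += dictionary[char] if char in dictionary else char
--         word[i] = final_word.upper()
--     return sep.join(word)
-- ===== SOURCE B (Python) =====
-- def transliterate(string: str, dictionary: dict, sep="<") -> str:
--     out = []
--     for char in string:
--         if char == "-" or char == " ":
--             out.append(sep)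
--         else:
--             out.append(dictionary.get(char, char).upper())
--     return "".join(out)
-- ===== Notes on version B (the rewrite author's own statement) =====
-- stated objective: simpler
-- what changed: Replaced A's replace/split pipeline with its word list, nested per-word transliteration loop and sep.join by a single scan of the original string that emits sep for each '-' or ' ' and the uppercased transliteration of every other character.
import Mathlib
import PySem

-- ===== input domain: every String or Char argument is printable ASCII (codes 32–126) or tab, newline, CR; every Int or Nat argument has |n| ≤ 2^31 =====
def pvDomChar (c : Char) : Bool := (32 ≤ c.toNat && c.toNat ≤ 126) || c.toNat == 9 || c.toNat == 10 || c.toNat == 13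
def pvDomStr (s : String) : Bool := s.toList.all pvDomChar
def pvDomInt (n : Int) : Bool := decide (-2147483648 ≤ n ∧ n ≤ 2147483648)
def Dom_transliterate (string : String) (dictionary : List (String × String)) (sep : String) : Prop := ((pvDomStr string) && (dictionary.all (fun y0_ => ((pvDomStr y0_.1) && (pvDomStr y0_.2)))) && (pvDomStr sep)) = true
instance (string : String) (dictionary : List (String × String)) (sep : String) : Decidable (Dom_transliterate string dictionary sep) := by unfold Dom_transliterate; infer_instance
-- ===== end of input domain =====

-- B replaces A's replace/split → per-word nested loop → join pipeline by a single scan of the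
-- original string emitting sep for '-'/' ' and the uppercased transliteration per character
-- (objective: simpler — one pass, no word list).

-- ===== PORT A =====
-- Python A: replace '-' by ' ', split on ' ', transliterate+uppercase each word in place, join with sep.
def transliterate (string : String) (dictionary : List (String × String)) (sep : String) : String :=
  let d := PySem.Dict.ofList dictionary
  let word : List (List Char) :=
    PySem.Chars.splitOn (PySem.Chars.replace string.toList ['-'] [' ']) [' ']
  let word := (PySem.List.pyRange 0 (word.length : Int)).foldl (fun w i =>
      let finalWord := (PySem.List.pyGetD w i []).foldl
        (fun fw c =>
          fw ++ (match d.get? (String.ofList [c]) with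
                 | some v => v.toList
                 | none => [c])) []
      w.set i.toNat (PySem.Chars.upper finalWord)) word
  String.ofList (PySem.Chars.join sep.toList word)

-- ===== PORT B =====
-- Python B: one pass; each char becomes sep (if '-' or ' ') or its uppercased transliteration; join pieces.
def transliterate_alt (string : String) (dictionary : List (String × String)) (sep : String) : String :=
  let d := PySem.Dict.ofList dictionary
  let out : List String := string.toList.foldl (fun out c =>
      out ++ [if c = '-' ∨ c = ' ' then sep
              else PySem.Str.upper (d.getD (String.ofList [c]) (String.ofList [c]))]) []
  PySem.Str.join "" out

-- ===== PRECONDITION & SPEC =====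
def Spec_transliterate (string : String) (dictionary : List (String × String)) (sep : String) (out : String) : Prop := out = transliterate_alt string dictionary sep
instance (string : String) (dictionary : List (String × String)) (sep : String) (out : String) : Decidable (Spec_transliterate string dictionary sep out) := by unfold Spec_transliterate; infer_instance

-- ===== CLAIM (what is proved, stated in full; the proofs are below) =====
def Claim_equal_transliterate : Prop := ∀ (string : String) (dictionary : List (String × String)) (sep : String), Dom_transliterate string dictionary sep → Spec_transliterate string dictionary sep (transliterate string dictionary sep)

-- ===== LEMMAS AND PROOFS =====
theorem replace_go_char (o : Char) (new : List Char) :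
    ∀ (l : List Char) (fuel : Nat) (acc : List Char), l.length ≤ fuel →
      PySem.Chars.replace.go [o] new fuel l acc
        = acc.reverse ++ l.flatMap (fun c => if c = o then new else [c]) := by
  intro l
  induction l with
  | nil =>
    intro fuel acc _
    cases fuel <;> simp [PySem.Chars.replace.go]
  | cons c t ih =>
    intro fuel acc h
    cases fuel with
    | zero => simp at h
    | succ f =>
      simp only [PySem.Chars.replace.go, List.isPrefixOf]
      by_cases hc : c = o
      · simp [hc, ih f _ (by simpa using h)]
      · simp [Ne.symm hc, ih f _ (by simpa using h), hc]

theorem replace_char (o : Char) (new s : List Char) :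
    PySem.Chars.replace s [o] new = s.flatMap (fun c => if c = o then new else [c]) := by
  simp [PySem.Chars.replace, replace_go_char o new s s.length [] le_rfl]

def consHead (p : List Char) : List (List Char) → List (List Char)
  | [] => [p]
  | h :: t => (p ++ h) :: t

def mySplit (s : Char) : List Char → List (List Char)
  | [] => [[]]
  | c :: t => if c = s then [] :: mySplit s t else consHead [c] (mySplit s t)

theorem consHead_ne_nil (p : List Char) (m : List (List Char)) : consHead p m ≠ [] := by
  cases m <;> simp [consHead]

theorem mySplit_ne_nil (s : Char) (l : List Char) : mySplit s l ≠ [] := by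
  cases l with
  | nil => simp [mySplit]
  | cons c t =>
    by_cases h : c = s <;> simp [mySplit, h, consHead_ne_nil]

theorem consHead_nil_of_ne (m : List (List Char)) (h : m ≠ []) : consHead [] m = m := by
  cases m with
  | nil => exact absurd rfl h
  | cons a t => simp [consHead]

theorem split_go_char (s : Char) :
    ∀ (l : List Char) (fuel : Nat) (cur : List Char) (acc : List (List Char)), l.length ≤ fuel →
      PySem.Chars.splitOn.go [s] fuel l cur acc
        = acc.reverse ++ consHead cur.reverse (mySplit s l) := by
  intro l
  induction l with
  | nil =>
    intro fuel cur acc _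
    cases fuel <;> simp [PySem.Chars.splitOn.go, mySplit, consHead]
  | cons c t ih =>
    intro fuel cur acc h
    cases fuel with
    | zero => simp at h
    | succ f =>
      simp only [PySem.Chars.splitOn.go, List.isPrefixOf]
      by_cases hc : s = c
      · subst hc
        simp only [mySplit]
        rw [if_pos (by simp)]
        simp only [List.length_singleton, List.drop_one, List.tail_cons]
        rw [ih f [] _ (by simpa using h)]
        obtain ⟨m0, mt, hm⟩ : ∃ m0 mt, mySplit s t = m0 :: mt := by
          cases hmm : mySplit s t with
          | nil => exact absurd hmm (mySplit_ne_nil s t)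
          | cons a b => exact ⟨a, b, rfl⟩
        simp [hm, consHead]
      · rw [if_neg (by simp; exact hc)]
        rw [ih f (c :: cur) _ (by simpa using h)]
        simp only [mySplit]
        rw [if_neg (fun hh => hc hh.symm)]
        obtain ⟨m0, mt, hm⟩ : ∃ m0 mt, mySplit s t = m0 :: mt := by
          cases hmm : mySplit s t with
          | nil => exact absurd hmm (mySplit_ne_nil s t)
          | cons a b => exact ⟨a, b, rfl⟩
        simp [hm, consHead]

theorem splitOn_char (s : Char) (l : List Char) :
    PySem.Chars.splitOn l [s] = mySplit s l := by
  rw [PySem.Chars.splitOn, split_go_char s l (l.length + 1) [] [] (by omega)]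
  simp [consHead_nil_of_ne _ (mySplit_ne_nil s l)]

theorem join_cons_flat (sep x : List Char) (l : List (List Char)) :
    PySem.Chars.join sep (x :: l) = x ++ l.flatMap (fun y => sep ++ y) := by
  induction l generalizing x with
  | nil => simp [PySem.Chars.join_singleton]
  | cons y t ih => simp [PySem.Chars.join_cons_cons, ih y]

theorem setloop {α : Type} (Fm : α → α) (dflt : α) :
    ∀ (w pre : List α),
      (List.range' pre.length w.length).foldl
          (fun w i => w.set i (Fm (w.getD i dflt))) (pre ++ w)
        = pre ++ w.map Fm := by
  intro w
  induction w with
  | nil => intro pre; simp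
  | cons x t ih =>
    intro pre
    simp only [List.length_cons, List.range'_succ, List.foldl_cons]
    have hget : (pre ++ x :: t).getD pre.length dflt = x := by
      simp [List.getD]
    have hset : (pre ++ x :: t).set pre.length (Fm x) = (pre ++ [Fm x]) ++ t := by
      rw [List.set_append_right _ _ (le_refl pre.length)]
      simp
    rw [hget, hset]
    have := ih (pre ++ [Fm x])
    simp only [List.length_append, List.length_singleton] at this
    simpa using this

theorem join_nil_cons (sepL : List Char) (M : List (List Char)) (h : M ≠ []) :
    PySem.Chars.join sepL ([] :: M) = sepL ++ PySem.Chars.join sepL M := by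
  cases M with
  | nil => exact absurd rfl h
  | cons a m => simp [PySem.Chars.join_cons_cons]

theorem join_head_append (sepL a x : List Char) (m : List (List Char)) :
    PySem.Chars.join sepL ((a ++ x) :: m) = a ++ PySem.Chars.join sepL (x :: m) := by
  cases m <;> simp [PySem.Chars.join_singleton, PySem.Chars.join_cons_cons]

theorem main_chars (d : PySem.Dict String String) (sepL : List Char) (cs : List Char) :
    PySem.Chars.join sepL
        (((mySplit ' ' (cs.flatMap (fun c => if c = '-' then [' '] else [c]))).map
          (fun fw => PySem.Chars.upper (fw.flatMap (fun c =>
            match d.get? (String.ofList [c]) with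
            | some v => v.toList
            | none => [c])))))
      = cs.flatMap (fun c =>
          if c = '-' ∨ c = ' ' then sepL
          else PySem.Chars.upper (match d.get? (String.ofList [c]) with
            | some v => v.toList
            | none => [c])) := by
  induction cs with
  | nil => simp [mySplit, PySem.Chars.join_singleton, PySem.Chars.upper]
  | cons c t ih =>
    obtain ⟨m0, mt, hm⟩ : ∃ m0 mt,
        mySplit ' ' (t.flatMap (fun c => if c = '-' then [' '] else [c])) = m0 :: mt := by
      cases hmm : mySplit ' ' (t.flatMap (fun c => if c = '-' then [' '] else [c])) with
      | nil => exact absurd hmm (mySplit_ne_nil _ _)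
      | cons a b => exact ⟨a, b, rfl⟩
    rw [hm] at ih
    simp only [List.map_cons] at ih
    by_cases hsep : c = '-' ∨ c = ' '
    · have hrep : (if c = '-' then [' '] else [c]) = [' '] := by
        rcases hsep with h | h <;> simp [h]
      simp only [List.flatMap_cons, hrep, List.singleton_append, if_pos hsep]
      have hms : mySplit ' ' (' ' :: t.flatMap (fun c => if c = '-' then [' '] else [c]))
          = [] :: m0 :: mt := by simp [mySplit, hm]
      rw [hms, List.map_cons]
      rw [show PySem.Chars.upper (List.flatMap (fun c =>
            match d.get? (String.ofList [c]) with
            | some v => v.toList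
            | none => [c]) []) = ([] : List Char) from rfl]
      rw [join_nil_cons _ _ (by simp), List.map_cons, ih]
    · have hc' : ¬ c = '-' := fun h => hsep (Or.inl h)
      have hc'' : ¬ c = ' ' := fun h => hsep (Or.inr h)
      simp only [List.flatMap_cons, if_neg hc', List.singleton_append, if_neg hsep]
      have hms : mySplit ' ' (c :: t.flatMap (fun c => if c = '-' then [' '] else [c]))
          = (c :: m0) :: mt := by simp [mySplit, hc'', hm, consHead]
      rw [hms, List.map_cons, List.flatMap_cons]
      rw [show PySem.Chars.upper
            ((match d.get? (String.ofList [c]) with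
              | some v => v.toList
              | none => [c]) ++ m0.flatMap _)
          = PySem.Chars.upper (match d.get? (String.ofList [c]) with
              | some v => v.toList
              | none => [c]) ++ PySem.Chars.upper (m0.flatMap (fun c =>
                match d.get? (String.ofList [c]) with
                | some v => v.toList
                | none => [c])) from by simp [PySem.Chars.upper]]
      rw [join_head_append]
      rw [ih]

theorem join_empty_flat (ps : List (List Char)) :
    PySem.Chars.join [] ps = ps.flatten := by
  cases ps with
  | nil => simp [PySem.Chars.join_nil]
  | cons x l => simp [join_cons_flat]

theorem ports_eq (string : String) (dictionary : List (String × String)) (sep : String) :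
    (String.ofList (PySem.Chars.join sep.toList
      (((PySem.List.pyRange 0 ((PySem.Chars.splitOn (PySem.Chars.replace string.toList ['-'] [' ']) [' ']).length : Int)).foldl (fun w i =>
        w.set i.toNat (PySem.Chars.upper ((PySem.List.pyGetD w i []).foldl
          (fun fw c => fw ++ (match (PySem.Dict.ofList dictionary).get? (String.ofList [c]) with
                 | some v => v.toList
                 | none => [c])) [])))
        (PySem.Chars.splitOn (PySem.Chars.replace string.toList ['-'] [' ']) [' '])))))
    = PySem.Str.join "" (string.toList.foldl (fun out c =>
      out ++ [if c = '-' ∨ c = ' ' then sep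
              else PySem.Str.upper ((PySem.Dict.ofList dictionary).getD (String.ofList [c]) (String.ofList [c]))]) []) := by
  set d := PySem.Dict.ofList dictionary with hd
  -- A side
  rw [replace_char, splitOn_char]
  rw [PySem.List.pyRange_zero_natCast, List.foldl_map]
  simp only [PySem.List.pyGetD_natCast, Int.toNat_natCast,
    PySem.List.foldl_append_eq_flatMap, List.nil_append]
  rw [List.range_eq_range']
  have hsl := setloop (fun fw => PySem.Chars.upper (fw.flatMap (fun c =>
      match d.get? (String.ofList [c]) with
      | some v => v.toList
      | none => [c]))) ([] : List Char)
    (mySplit ' ' (string.toList.flatMap fun c => if c = '-' then [' '] else [c])) []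
  simp only [List.length_nil, List.nil_append] at hsl
  rw [hsl, main_chars]
  -- B side
  rw [show (List.flatMap (fun x => [if x = '-' ∨ x = ' ' then sep else PySem.Str.upper (d.getD (String.ofList [x]) (String.ofList [x]))]) string.toList) = string.toList.map (fun x => if x = '-' ∨ x = ' ' then sep else PySem.Str.upper (d.getD (String.ofList [x]) (String.ofList [x]))) from Eq.symm List.map_eq_flatMap]
  have hb : (PySem.Str.join "" (string.toList.map (fun c =>
      if c = '-' ∨ c = ' ' then sep
      else PySem.Str.upper (d.getD (String.ofList [c]) (String.ofList [c]))))).toList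
      = string.toList.flatMap (fun c =>
          if c = '-' ∨ c = ' ' then sep.toList
          else PySem.Chars.upper (match d.get? (String.ofList [c]) with
            | some v => v.toList
            | none => [c])) := by
    rw [PySem.Str.toList_join, show ("" : String).toList = [] from rfl, join_empty_flat,
        List.flatMap_def, List.map_map]
    congr 1
    refine List.map_congr_left ?_
    intro c _
    by_cases hsep : c = '-' ∨ c = ' '
    · simp [hsep]
    · simp only [Function.comp, if_neg hsep, PySem.Str.toList_upper, PySem.Dict.getD]
      cases d.get? (String.ofList [c]) <;> simp
  rw [← hb, String.ofList_toList]

-- ===== VERDICT (by name: the statement is the Claim_ definition above) =====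
theorem transliterate_spec : Claim_equal_transliterate := by
  intro string dictionary sep _
  unfold Spec_transliterate transliterate transliterate_alt
  exact ports_eq string dictionary sep
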